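-- pv_equiv track=rewrite | github.com/jaiesh-pahlajani/data_structures_and_algos | dynamic_programming/p11_max_ribbon_cut.py | max_ribbon_cut
-- ===== SOURCE A (Python) =====
-- def max_ribbon_cut(ribbon_length, possible_cuts):
--
--     dp = [0] * (ribbon_length + 1)
--
--     for cut in possible_cuts:
--         dp[cut] = 1
--
--     for length in range(1, ribbon_length+1):
--         for cut in possible_cuts:
--             if cut <= length:
--                 if dp[length-cut]:
--                     var1 = dp[length - cut] + 1
--                     dp[length] = max(dp[length], var1)
--     return dp
-- ===== SOURCE B (Python) =====
-- def max_ribbon_cut(ribbon_length, possible_cuts):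
--     # base-case table: base[j] = 1 iff a single piece of length j is allowed
--     base = [0] * (ribbon_length + 1)
--     for cut in possible_cuts:
--         base[cut] = 1
--     memo = {0: 0}
--
--     def best(j):
--         if j in memo:
--             return memo[j]
--         b = base[j]
--         for c in possible_cuts:
--             if c <= j:
--                 v = best(j - c)
--                 if v > 0:
--                     b = max(b, v + 1)
--         memo[j] = b
--         return b
--
--     return [best(j) for j in range(ribbon_length + 1)]
-- ===== Notes on version B (the rewrite author's own statement) =====
-- stated objective: alternative
-- what changed: Replaces A's bottom-up nested-loop DP over the array by a top-down memoized recursion: after the shared base-case pass, a recursive best(j) with a dict memo computes each entry on demand and a list comprehension collects the table.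
-- outside the precondition, e.g. on max_ribbon_cut(5, [0, 2]): A returns [1, 0, 2, 0, 3, 0], B raises RecursionError; on max_ribbon_cut(0, [-1]): A returns [1], B returns [0]
import Mathlib
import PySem

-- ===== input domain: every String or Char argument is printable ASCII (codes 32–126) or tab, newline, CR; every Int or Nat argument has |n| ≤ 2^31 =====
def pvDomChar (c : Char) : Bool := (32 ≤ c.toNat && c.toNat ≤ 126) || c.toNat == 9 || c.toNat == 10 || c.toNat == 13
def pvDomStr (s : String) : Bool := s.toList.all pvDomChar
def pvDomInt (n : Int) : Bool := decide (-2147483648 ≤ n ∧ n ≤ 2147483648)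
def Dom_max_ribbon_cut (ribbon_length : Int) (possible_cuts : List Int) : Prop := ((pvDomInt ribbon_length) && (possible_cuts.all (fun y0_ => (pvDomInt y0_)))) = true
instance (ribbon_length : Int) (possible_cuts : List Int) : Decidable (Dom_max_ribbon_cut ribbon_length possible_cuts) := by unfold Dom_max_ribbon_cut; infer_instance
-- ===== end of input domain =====

-- B replaces A's bottom-up array DP by a top-down memoized recursion (set of cuts + dict memo,
-- evaluated by a list comprehension); objective: alternative, same cost; return values proved equal on Pre_.

-- ===== PORT A =====
-- inner loop of A: for cut in possible_cuts: if cut <= length: if dp[length-cut]: dp[length] = max(dp[length], dp[length-cut]+1)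
def pullInner (dp : List Int) (length : Int) (cuts : List Int) : List Int :=
  cuts.foldl (fun dp cut =>
    if cut ≤ length then
      if PySem.List.pyGetD dp (length - cut) 0 ≠ 0 then
        PySem.List.pySetD dp length (max (PySem.List.pyGetD dp length 0) (PySem.List.pyGetD dp (length - cut) 0 + 1))
      else dp
    else dp) dp

def max_ribbon_cut (ribbon_length : Int) (possible_cuts : List Int) : List Int :=
  let dp := List.replicate (ribbon_length + 1).toNat 0
  let dp := possible_cuts.foldl (fun dp cut => PySem.List.pySetD dp cut 1) dp
  (PySem.List.pyRange 1 (ribbon_length + 1) 1).foldl (fun dp length => pullInner dp length possible_cuts) dp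

-- ===== PORT B =====
-- base = [0]*(n+1); for cut in possible_cuts: base[cut] = 1   (B's base-case table, then:)
-- def best(j): memo hit | b = base[j]; for c in possible_cuts: if c <= j: v = best(j-c); if v > 0: b = max(b, v+1);
-- memo[j] = b.  The dict memo is threaded through explicitly; fuel only makes the recursion total (never
-- exhausted on Pre_ inputs); base[j] is read with pyGetD, exact since every requested j lies in range.
def bestB (base : List Int) (cuts : List Int) (fuel : Nat) (memo : PySem.Dict Int Int) (j : Int) :
    Int × PySem.Dict Int Int :=
  match PySem.Dict.get? memo j with
  | some v => (v, memo)
  | none =>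
    match fuel with
    | 0 => (0, memo)
    | f + 1 =>
      let r := cuts.foldl (fun (p : Int × PySem.Dict Int Int) c =>
          if c ≤ j then
            let q := bestB base cuts f p.2 (j - c)
            if 0 < q.1 then (max p.1 (q.1 + 1), q.2) else (p.1, q.2)
          else p) (PySem.List.pyGetD base j 0, memo)
      (r.1, PySem.Dict.insert r.2 j r.1)

-- return [best(j) for j in range(ribbon_length + 1)]
def max_ribbon_cut_alt (ribbon_length : Int) (possible_cuts : List Int) : List Int :=
  let base := List.replicate (ribbon_length + 1).toNat 0
  let base := possible_cuts.foldl (fun base cut => PySem.List.pySetD base cut 1) base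
  let memo0 : PySem.Dict Int Int := PySem.Dict.insert PySem.Dict.empty 0 0
  ((PySem.List.pyRange 0 (ribbon_length + 1) 1).foldl
      (fun (p : List Int × PySem.Dict Int Int) j =>
        let r := bestB base possible_cuts j.toNat p.2 j
        (p.1 ++ [r.1], r.2))
      ([], memo0)).1

-- ===== PRECONDITION & SPEC =====
-- Pre_ excludes inputs on which A raises IndexError (a cut above ribbon_length; negative cuts, which
-- make A read past the end of dp for every ribbon_length ≥ 1), and the degenerate cut 0 (a
-- zero-length piece), on which A's repeated self-increment of dp[length] is an implementation
-- accident whose value is as defensible as any other (B's recursion does not terminate there);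
-- likewise a negative cut at ribbon_length = 0, where A's wraparound write dp[-1] = 1 is accidental.
def Pre_max_ribbon_cut (ribbon_length : Int) (possible_cuts : List Int) : Prop :=
  ∀ c ∈ possible_cuts, 1 ≤ c ∧ c ≤ ribbon_length
instance (ribbon_length : Int) (possible_cuts : List Int) : Decidable (Pre_max_ribbon_cut ribbon_length possible_cuts) := by unfold Pre_max_ribbon_cut; infer_instance

def pvWitness_max_ribbon_cut : Int × List Int := (7, [2, 3])

def Spec_max_ribbon_cut (ribbon_length : Int) (possible_cuts : List Int) (out : List Int) : Prop := out = max_ribbon_cut_alt ribbon_length possible_cuts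
instance (ribbon_length : Int) (possible_cuts : List Int) (out : List Int) : Decidable (Spec_max_ribbon_cut ribbon_length possible_cuts out) := by unfold Spec_max_ribbon_cut; infer_instance

-- ===== CLAIM (what is proved, stated in full; the proofs are below) =====
def Claim_equal_max_ribbon_cut : Prop := ∀ (ribbon_length : Int) (possible_cuts : List Int), Dom_max_ribbon_cut ribbon_length possible_cuts → Pre_max_ribbon_cut ribbon_length possible_cuts → Spec_max_ribbon_cut ribbon_length possible_cuts (max_ribbon_cut ribbon_length possible_cuts)

-- ===== LEMMAS AND PROOFS =====

-- total getD of a set, as an if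
theorem pv_getD_set (xs : List Int) (n m : ℕ) (v : Int) :
    (xs.set n v).getD m 0 = if m = n ∧ n < xs.length then v else xs.getD m 0 := by
  simp only [List.getD_eq_getElem?_getD, List.getElem?_set]
  split_ifs with h1 h2 h3 <;> simp_all

theorem pv_pyGetD_nonneg (xs : List Int) (i : Int) (h : 0 ≤ i) :
    PySem.List.pyGetD xs i 0 = xs.getD i.toNat 0 := by
  obtain ⟨n, rfl⟩ := Int.eq_ofNat_of_zero_le h
  simp [PySem.List.pyGetD_natCast]

theorem pv_getD_replicate (n m : ℕ) : (List.replicate n (0 : Int)).getD m 0 = 0 := by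
  simp only [List.getD_eq_getElem?_getD, List.getElem?_replicate]
  split <;> rfl

-- facts about the max-accumulating fold shape shared by both programs
theorem pv_le_foldl {p : Int → Prop} [DecidablePred p] {f : Int → Int} :
    ∀ (l : List Int) (a : Int), a ≤ l.foldl (fun v c => if p c then max v (f c) else v) a := by
  intro l
  induction l with
  | nil => intro a; exact le_refl a
  | cons c t ih =>
    intro a
    refine le_trans ?_ (ih _)
    by_cases h : p c <;> simp [h]

-- lengths are preserved by A's inner loop
theorem pullInner_length (cuts : List Int) : ∀ (dp : List Int) (l : Int),
    (pullInner dp l cuts).length = dp.length := by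
  induction cuts with
  | nil => intro dp l; rfl
  | cons c t ih =>
    intro dp l
    show (pullInner _ l t).length = _
    rw [ih]
    dsimp only
    split_ifs <;> simp [PySem.List.length_pySetD]

-- A's run after processing lengths 1..k, and the resulting table
def runA (cuts g : List Int) (k : ℕ) : List Int :=
  (PySem.List.pyRange 1 ((k : Int) + 1) 1).foldl (fun dp l => pullInner dp l cuts) g

def tblT (cuts g : List Int) (j : ℕ) : Int := (runA cuts g j).getD j 0

theorem runA_zero (cuts g : List Int) : runA cuts g 0 = g := by
  simp [runA, PySem.List.pyRange_one_eq_nil]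

theorem runA_succ (cuts g : List Int) (k : ℕ) :
    runA cuts g (k + 1) = pullInner (runA cuts g k) ((k : Int) + 1) cuts := by
  unfold runA
  rw [show ((k + 1 : ℕ) : Int) + 1 = ((k : Int) + 1) + 1 by push_cast; ring,
    PySem.List.pyRange_one_succ_right (by omega), List.foldl_append]
  rfl

theorem runA_length (cuts g : List Int) (k : ℕ) : (runA cuts g k).length = g.length := by
  induction k with
  | zero => rw [runA_zero]
  | succ k ih => rw [runA_succ, pullInner_length, ih]

-- what one pull pass at position j does, entrywise
theorem pullInner_getD (cuts : List Int) (hc : ∀ c ∈ cuts, 1 ≤ c) :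
    ∀ (dp : List Int) (j m : ℕ), j < dp.length →
    (pullInner dp ((j : Int)) cuts).getD m 0
      = if m = j then
          cuts.foldl (fun v c =>
            if c ≤ (j : Int) ∧ dp.getD ((j : Int) - c).toNat 0 ≠ 0 then
              max v (dp.getD ((j : Int) - c).toNat 0 + 1)
            else v) (dp.getD j 0)
        else dp.getD m 0 := by
  revert hc
  induction cuts with
  | nil =>
    intro _ dp j m _
    by_cases h : m = j <;> simp [pullInner, h]
  | cons c t ih =>
    intro hc dp j m hj
    have hc1 : (1 : Int) ≤ c := hc c (List.mem_cons_self)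
    have hct : ∀ x ∈ t, (1 : Int) ≤ x := fun x hx => hc x (List.mem_cons_of_mem _ hx)
    -- one step of the inner loop
    have hstep : pullInner dp ((j : Int)) (c :: t)
        = pullInner (if c ≤ (j : Int) then
            (if PySem.List.pyGetD dp ((j : Int) - c) 0 ≠ 0 then
              PySem.List.pySetD dp ((j : Int))
                (max (PySem.List.pyGetD dp ((j : Int)) 0) (PySem.List.pyGetD dp ((j : Int) - c) 0 + 1))
            else dp)
          else dp) ((j : Int)) t := rfl
    set dp1 := (if c ≤ (j : Int) then
            (if PySem.List.pyGetD dp ((j : Int) - c) 0 ≠ 0 then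
              PySem.List.pySetD dp ((j : Int))
                (max (PySem.List.pyGetD dp ((j : Int)) 0) (PySem.List.pyGetD dp ((j : Int) - c) 0 + 1))
            else dp)
          else dp) with hdp1
    have hlen1 : dp1.length = dp.length := by
      rw [hdp1]; split_ifs <;> simp only [PySem.List.length_pySetD]
    -- dp1 agrees with dp off index j
    have hoff : ∀ (m' : ℕ), m' ≠ j → dp1.getD m' 0 = dp.getD m' 0 := by
      intro m' hm'
      rw [hdp1]
      split_ifs with h1 h2
      · rw [PySem.List.pySetD_natCast, pv_getD_set, if_neg (by omega)]
      · rfl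
      · rfl
    -- the value dp1 stores at j is one step of the max-accumulation
    have hat : dp1.getD j 0
        = (if c ≤ (j : Int) ∧ dp.getD ((j : Int) - c).toNat 0 ≠ 0 then
            max (dp.getD j 0) (dp.getD ((j : Int) - c).toNat 0 + 1)
          else dp.getD j 0) := by
      rw [hdp1]
      by_cases h1 : c ≤ (j : Int)
      · rw [if_pos h1, pv_pyGetD_nonneg dp ((j : Int) - c) (by omega)]
        by_cases h2 : dp.getD ((j : Int) - c).toNat 0 ≠ 0
        · rw [if_pos h2, if_pos ⟨h1, h2⟩, PySem.List.pySetD_natCast, pv_getD_set,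
            if_pos ⟨rfl, hj⟩, PySem.List.pyGetD_natCast]
        · rw [if_neg h2, if_neg (by tauto)]
      · rw [if_neg h1, if_neg (by tauto)]
    rw [hstep, ih hct dp1 j m (by omega)]
    by_cases h : m = j
    · subst h
      rw [if_pos rfl, if_pos rfl]
      show _ = List.foldl _ ((fun v c =>
            if c ≤ (m : Int) ∧ dp.getD ((m : Int) - c).toNat 0 ≠ 0 then
              max v (dp.getD ((m : Int) - c).toNat 0 + 1)
            else v) (dp.getD m 0) c) t
      dsimp only
      rw [← hat]
      refine PySem.List.foldl_congr_mem t _ _ _ ?_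
      intro v x hx
      dsimp only
      by_cases hxj : x ≤ (m : Int)
      · rw [hoff ((m : Int) - x).toNat (by have := hct x hx; omega)]
      · rw [if_neg (by tauto), if_neg (by tauto)]
    · rw [if_neg h, if_neg h, hoff m h]

-- entries above the processed prefix are untouched by A's run
theorem runA_getD_high (cuts g : List Int) (hc : ∀ c ∈ cuts, 1 ≤ c) :
    ∀ (k : ℕ), k < g.length → ∀ (j : ℕ), k < j → (runA cuts g k).getD j 0 = g.getD j 0 := by
  intro k
  induction k with
  | zero => intro _ j _; rw [runA_zero]
  | succ k ih =>
    intro hk j hj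
    rw [runA_succ, show ((k : Int) + 1) = ((k + 1 : ℕ) : Int) by push_cast; ring,
      pullInner_getD cuts hc _ (k + 1) j (by rw [runA_length]; omega)]
    rw [if_neg (by omega)]
    exact ih (by omega) j (by omega)

-- entries in the processed prefix have their final value
theorem runA_getD_low (cuts g : List Int) (hc : ∀ c ∈ cuts, 1 ≤ c) :
    ∀ (k : ℕ), k < g.length → ∀ (j : ℕ), j ≤ k → (runA cuts g k).getD j 0 = tblT cuts g j := by
  intro k
  induction k with
  | zero => intro _ j hj; interval_cases j; rfl
  | succ k ih =>
    intro hk j hj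
    by_cases hjk : j = k + 1
    · subst hjk; rfl
    · rw [runA_succ, show ((k : Int) + 1) = ((k + 1 : ℕ) : Int) by push_cast; ring,
        pullInner_getD cuts hc _ (k + 1) j (by rw [runA_length]; omega)]
      rw [if_neg (by omega)]
      exact ih (by omega) j (by omega)

-- the fixed-point equation satisfied by A's table
theorem tblT_fixed (cuts g : List Int) (hc : ∀ c ∈ cuts, 1 ≤ c) (j : ℕ)
    (h1 : 1 ≤ j) (hj : j < g.length) :
    tblT cuts g j = cuts.foldl (fun v c =>
        if c ≤ (j : Int) ∧ tblT cuts g ((j : Int) - c).toNat ≠ 0 then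
          max v (tblT cuts g ((j : Int) - c).toNat + 1)
        else v) (g.getD j 0) := by
  obtain ⟨k, rfl⟩ : ∃ k, j = k + 1 := ⟨j - 1, by omega⟩
  show (runA cuts g (k + 1)).getD (k + 1) 0 = _
  rw [runA_succ, show ((k : Int) + 1) = (((k + 1 : ℕ)) : Int) by push_cast; ring,
    pullInner_getD cuts hc _ (k + 1) (k + 1) (by rw [runA_length]; omega), if_pos rfl,
    runA_getD_high cuts g hc k (by omega) (k + 1) (by omega)]
  refine PySem.List.foldl_congr_mem _ _ _ _ ?_
  intro v c hcm
  dsimp only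
  by_cases h1 : c ≤ ((k + 1 : ℕ) : Int)
  · rw [runA_getD_low cuts g hc k (by omega) (((k + 1 : ℕ) : Int) - c).toNat
      (by have := hc c hcm; omega)]
  · rw [if_neg (by tauto), if_neg (by tauto)]

theorem tblT_zero (cuts g : List Int) : tblT cuts g 0 = g.getD 0 0 := by
  unfold tblT; rw [runA_zero]

-- the shared first pass (dp = [0]*(n+1); dp[cut] = 1), characterised entrywise
theorem initArr_length (cuts : List Int) (d : List Int) :
    (cuts.foldl (fun dp cut => PySem.List.pySetD dp cut 1) d).length = d.length := by
  induction cuts generalizing d with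
  | nil => rfl
  | cons c t ih => rw [List.foldl_cons, ih, PySem.List.length_pySetD]

theorem initArr_getD (cuts : List Int) :
    ∀ (d : List Int), (∀ c ∈ cuts, 0 ≤ c ∧ c < (d.length : Int)) → ∀ (j : ℕ),
    (cuts.foldl (fun dp cut => PySem.List.pySetD dp cut 1) d).getD j 0
      = if (j : Int) ∈ cuts then 1 else d.getD j 0 := by
  induction cuts with
  | nil => intro d _ j; simp
  | cons c t ih =>
    intro d hc j
    have hc0 := hc c List.mem_cons_self
    have hsetD : PySem.List.pySetD d c 1 = d.set c.toNat 1 := by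
      rw [show c = ((c.toNat : ℕ) : Int) by omega, PySem.List.pySetD_natCast]
      congr 1
    rw [List.foldl_cons, hsetD,
      ih _ (fun x hx => by
        have := hc x (List.mem_cons_of_mem _ hx)
        simpa [List.length_set] using this) j]
    by_cases hjt : (j : Int) ∈ t
    · simp [hjt, List.mem_cons]
    · rw [if_neg hjt, pv_getD_set]
      by_cases hjc : (j : Int) = c
      · rw [if_pos ⟨by omega, by omega⟩, if_pos (by simp [List.mem_cons, hjc])]
      · rw [if_neg (by omega), if_neg (by simp [List.mem_cons, hjc, hjt])]

-- the initial array g of both programs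
def gArr (rl : Int) (cuts : List Int) : List Int :=
  cuts.foldl (fun dp cut => PySem.List.pySetD dp cut 1) (List.replicate (rl + 1).toNat 0)

-- and A's table over it
def tblRC (rl : Int) (cuts : List Int) (j : ℕ) : Int := tblT cuts (gArr rl cuts) j

theorem gArr_length (rl : Int) (cuts : List Int) (hrl : 0 ≤ rl) :
    (gArr rl cuts).length = rl.toNat + 1 := by
  rw [gArr, initArr_length]; simp; omega

theorem gArr_getD (rl : Int) (cuts : List Int) (hPre : ∀ c ∈ cuts, 1 ≤ c ∧ c ≤ rl)
    (hrl : 0 ≤ rl) (j : ℕ) :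
    (gArr rl cuts).getD j 0 = if (j : Int) ∈ cuts then 1 else 0 := by
  rw [gArr, initArr_getD cuts _ (fun c hc => by
      have h1 := hPre c hc
      constructor
      · omega
      · rw [show ((List.replicate (rl+1).toNat (0:Int)).length : Int)
            = ((rl+1).toNat : Int) by simp]
        omega) j,
    pv_getD_replicate]

-- A's table is everywhere nonnegative
theorem runA_getD_nonneg (cuts g : List Int) (hc : ∀ c ∈ cuts, 1 ≤ c)
    (hg : ∀ m : ℕ, 0 ≤ g.getD m 0) :
    ∀ (k : ℕ), k < g.length → ∀ (m : ℕ), 0 ≤ (runA cuts g k).getD m 0 := by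
  intro k
  induction k with
  | zero => intro _ m; rw [runA_zero]; exact hg m
  | succ k ih =>
    intro hk m
    rw [runA_succ, show ((k : Int) + 1) = ((k + 1 : ℕ) : Int) by push_cast; ring,
      pullInner_getD cuts hc _ (k + 1) m (by rw [runA_length]; omega)]
    by_cases h : m = k + 1
    · rw [if_pos h]
      exact le_trans (ih (by omega) (k+1)) (pv_le_foldl _ _)
    · rw [if_neg h]; exact ih (by omega) m

theorem tbl_nonneg (rl : Int) (cuts : List Int) (hPre : ∀ c ∈ cuts, 1 ≤ c ∧ c ≤ rl)
    (hrl : 0 ≤ rl) (j : ℕ) (hj : j ≤ rl.toNat) : 0 ≤ tblRC rl cuts j := by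
  unfold tblRC tblT
  refine runA_getD_nonneg cuts _ (fun c hc => (hPre c hc).1) (fun m => ?_) j
    (by rw [gArr_length rl cuts hrl]; omega) j
  rw [gArr_getD rl cuts hPre hrl m]
  split_ifs <;> norm_num

theorem tblRC_zero (rl : Int) (cuts : List Int) (hPre : ∀ c ∈ cuts, 1 ≤ c ∧ c ≤ rl)
    (hrl : 0 ≤ rl) : tblRC rl cuts 0 = 0 := by
  unfold tblRC
  rw [tblT_zero, gArr_getD rl cuts hPre hrl 0,
    if_neg (fun h => by have := (hPre 0 (by simpa using h)).1; omega)]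

-- the memo after best(0), …, best(k) have returned
def memoD (rl : Int) (cuts : List Int) (k : ℕ) : PySem.Dict Int Int :=
  (List.range (k + 1)).foldl (fun d (i : ℕ) => PySem.Dict.insert d ((i : ℕ) : Int) (tblRC rl cuts i))
    PySem.Dict.empty

theorem memoD_succ (rl : Int) (cuts : List Int) (k : ℕ) :
    memoD rl cuts (k + 1)
      = (memoD rl cuts k).insert ((k + 1 : ℕ) : Int) (tblRC rl cuts (k + 1)) := by
  unfold memoD
  rw [List.range_succ, List.foldl_append, List.foldl_cons, List.foldl_nil]

theorem memoD_get? (rl : Int) (cuts : List Int) :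
    ∀ (k : ℕ) (j : Int), (memoD rl cuts k).get? j
      = if 0 ≤ j ∧ j ≤ (k : Int) then some (tblRC rl cuts j.toNat) else none := by
  intro k
  induction k with
  | zero =>
    intro j
    unfold memoD
    rw [List.range_one, List.foldl_cons, List.foldl_nil, PySem.Dict.get?_insert]
    by_cases h : j = ((0 : ℕ) : Int)
    · rw [if_pos h, if_pos (by omega), show j.toNat = 0 by omega]
    · rw [if_neg h, if_neg (by omega), PySem.Dict.get?_empty]
  | succ k ih =>
    intro j
    rw [memoD_succ, PySem.Dict.get?_insert]
    by_cases h : j = ((k + 1 : ℕ) : Int)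
    · rw [if_pos h, if_pos (by omega), show j.toNat = k + 1 by omega]
    · rw [if_neg h, ih j]
      by_cases h2 : 0 ≤ j ∧ j ≤ (k : Int)
      · rw [if_pos h2, if_pos (by omega)]
      · rw [if_neg h2, if_neg (by omega)]

-- a memo hit returns immediately, leaving the memo unchanged
theorem bestB_memo_hit (base : List Int) (cuts : List Int) (f : ℕ) (memo : PySem.Dict Int Int)
    (j : Int) (v : Int) (h : memo.get? j = some v) : bestB base cuts f memo j = (v, memo) := by
  rw [bestB.eq_def, h]

-- B's inner loop over a complete memo: the memo is untouched and the value is the pure max fold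
theorem inner_fold (rl : Int) (cuts : List Int) (base : List Int) (cutsR : List Int)
    (k : ℕ) (f : ℕ) :
    ∀ (l : List Int), (∀ c ∈ l, 1 ≤ c) → ∀ (b : Int),
      l.foldl (fun (p : Int × PySem.Dict Int Int) c =>
          if c ≤ ((k : Int) + 1) then
            let q := bestB base cutsR f p.2 (((k : Int) + 1) - c)
            if 0 < q.1 then (max p.1 (q.1 + 1), q.2) else (p.1, q.2)
          else p) (b, memoD rl cuts k)
      = (l.foldl (fun v c =>
            if c ≤ ((k : Int) + 1) ∧ 0 < tblRC rl cuts (((k : Int) + 1) - c).toNat then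
              max v (tblRC rl cuts (((k : Int) + 1) - c).toNat + 1)
            else v) b, memoD rl cuts k) := by
  intro l
  induction l with
  | nil => intro _ b; rfl
  | cons c t ih =>
    intro hc b
    have hc1 : (1 : Int) ≤ c := hc c List.mem_cons_self
    have hct : ∀ x ∈ t, (1 : Int) ≤ x := fun x hx => hc x (List.mem_cons_of_mem _ hx)
    rw [List.foldl_cons, List.foldl_cons]
    by_cases hcle : c ≤ (k : Int) + 1
    · have hhit : (memoD rl cuts k).get? (((k : Int) + 1) - c)
          = some (tblRC rl cuts (((k : Int) + 1) - c).toNat) := by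
        rw [memoD_get?, if_pos (by omega)]
      simp only [hcle, if_pos, bestB_memo_hit base cutsR f _ _ _ hhit]
      by_cases hpos : 0 < tblRC rl cuts (((k : Int) + 1) - c).toNat
      · simp only [hpos, if_pos, and_true]
        exact ih hct _
      · simp only [hpos, if_false, and_false]
        exact ih hct _
    · simp only [hcle, if_neg, not_false_iff, false_and]
      exact ih hct _

-- one top-level call best(k+1) over the complete memo for 0..k
theorem best_step (rl : Int) (cuts : List Int) (hPre : ∀ c ∈ cuts, 1 ≤ c ∧ c ≤ rl)
    (hrl : 0 ≤ rl) (k : ℕ) (hk : (k : Int) + 1 ≤ rl) (f : ℕ) :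
    bestB (gArr rl cuts) cuts (f + 1) (memoD rl cuts k) ((k : Int) + 1)
      = (tblRC rl cuts (k + 1), memoD rl cuts (k + 1)) := by
  have hnone : (memoD rl cuts k).get? ((k : Int) + 1) = none := by
    rw [memoD_get?, if_neg (by omega)]
  rw [bestB.eq_def, hnone]
  simp only
  rw [inner_fold rl cuts _ _ k f _ (fun c hc => (hPre c hc).1)]
  simp only
  have hb0 : PySem.List.pyGetD (gArr rl cuts) ((k : Int) + 1) 0
      = (gArr rl cuts).getD (k + 1) 0 := by
    rw [pv_pyGetD_nonneg _ _ (by omega), show ((k : Int) + 1).toNat = k + 1 by omega]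
  have hfix : tblRC rl cuts (k + 1) = cuts.foldl (fun v c =>
      if c ≤ (k : Int) + 1 ∧ tblRC rl cuts (((k : Int) + 1) - c).toNat ≠ 0 then
        max v (tblRC rl cuts (((k : Int) + 1) - c).toNat + 1)
      else v) ((gArr rl cuts).getD (k + 1) 0) := by
    have h0 := tblT_fixed cuts (gArr rl cuts) (fun c hc => (hPre c hc).1) (k + 1)
      (by omega) (by rw [gArr_length rl cuts hrl]; omega)
    rw [show ((k + 1 : ℕ) : Int) = (k : Int) + 1 by push_cast; ring] at h0
    exact h0
  have hF : (cuts.foldl (fun v c =>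
        if c ≤ ((k : Int) + 1) ∧ 0 < tblRC rl cuts (((k : Int) + 1) - c).toNat then
          max v (tblRC rl cuts (((k : Int) + 1) - c).toNat + 1)
        else v) (PySem.List.pyGetD (gArr rl cuts) ((k : Int) + 1) 0))
      = tblRC rl cuts (k + 1) := by
    rw [hb0]
    -- the two step predicates agree on members of cuts: 0 < tbl ↔ tbl ≠ 0 (tbl ≥ 0)
    refine Eq.trans (PySem.List.foldl_congr_mem cuts _ _ _ ?_) hfix.symm
    intro v c hcm
    dsimp only
    by_cases hcle : c ≤ (k : Int) + 1
    · have hnn : 0 ≤ tblRC rl cuts (((k : Int) + 1) - c).toNat :=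
        tbl_nonneg rl cuts hPre hrl _ (by have := hPre c hcm; omega)
      by_cases hpos : 0 < tblRC rl cuts (((k : Int) + 1) - c).toNat
      · rw [if_pos ⟨hcle, hpos⟩, if_pos ⟨hcle, by omega⟩]
      · rw [if_neg (fun h => hpos h.2), if_neg (fun h => h.2 (by omega))]
    · rw [if_neg (by tauto), if_neg (by tauto)]
  rw [hF]
  rw [memoD_succ, show ((k + 1 : ℕ) : Int) = (k : Int) + 1 by push_cast; ring]

-- B's top-level comprehension, processed up to j = k
theorem loopB (rl : Int) (cuts : List Int) (hPre : ∀ c ∈ cuts, 1 ≤ c ∧ c ≤ rl)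
    (hrl : 0 ≤ rl) :
    ∀ (k : ℕ), (k : Int) ≤ rl →
      (PySem.List.pyRange 0 ((k : Int) + 1) 1).foldl
          (fun (p : List Int × PySem.Dict Int Int) j =>
            let r := bestB (gArr rl cuts) cuts j.toNat p.2 j
            (p.1 ++ [r.1], r.2))
          ([], PySem.Dict.insert PySem.Dict.empty 0 0)
        = ((List.range (k + 1)).map (fun j => tblRC rl cuts j), memoD rl cuts k) := by
  have hm0 : (PySem.Dict.insert PySem.Dict.empty (0:Int) (0:Int)) = memoD rl cuts 0 := by
    show _ = PySem.Dict.insert PySem.Dict.empty ((0:ℕ) : Int) (tblRC rl cuts 0)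
    rw [tblRC_zero rl cuts hPre hrl]
    norm_num
  intro k
  induction k with
  | zero =>
    intro _
    rw [show ((0:ℕ) : Int) + 1 = (0 : Int) + 1 by norm_num, PySem.List.pyRange_one_singleton,
      List.foldl_cons, List.foldl_nil]
    simp only [hm0]
    rw [bestB_memo_hit (gArr rl cuts) cuts ((0 : Int)).toNat (memoD rl cuts 0) 0
      (tblRC rl cuts 0) (by rw [memoD_get?]; norm_num)]
    simp [List.range_one]
  | succ k ih =>
    intro hk
    rw [show ((k + 1 : ℕ) : Int) + 1 = ((k : Int) + 1) + 1 by push_cast; ring,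
      PySem.List.pyRange_one_succ_right (by omega), List.foldl_append,
      ih (by omega), List.foldl_cons, List.foldl_nil]
    simp only
    rw [show ((k : Int) + 1).toNat = k + 1 by omega,
      best_step rl cuts hPre hrl k (by push_cast at hk; omega) k]
    simp [List.range_succ]

theorem pv_main (rl : Int) (cuts : List Int) (hPre : ∀ c ∈ cuts, 1 ≤ c ∧ c ≤ rl) :
    max_ribbon_cut rl cuts = max_ribbon_cut_alt rl cuts := by
  by_cases hrl : 0 ≤ rl
  · have hc1 : ∀ c ∈ cuts, (1 : Int) ≤ c := fun c hc => (hPre c hc).1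
    -- B's side
    have hB : max_ribbon_cut_alt rl cuts
        = (List.range (rl.toNat + 1)).map (fun j => tblRC rl cuts j) := by
      show ((PySem.List.pyRange 0 (rl + 1) 1).foldl
          (fun (p : List Int × PySem.Dict Int Int) j =>
            let r := bestB (gArr rl cuts) cuts j.toNat p.2 j
            (p.1 ++ [r.1], r.2))
          ([], PySem.Dict.insert PySem.Dict.empty 0 0)).1 = _
      rw [show rl + 1 = ((rl.toNat : ℕ) : Int) + 1 by omega,
        loopB rl cuts hPre hrl rl.toNat (by omega)]
    -- A's side
    have hA : max_ribbon_cut rl cuts = runA cuts (gArr rl cuts) rl.toNat := by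
      unfold max_ribbon_cut runA gArr
      rw [show rl + 1 = ((rl.toNat : ℕ) : Int) + 1 by omega]
    rw [hA, hB]
    have hlen : (gArr rl cuts).length = rl.toNat + 1 := gArr_length rl cuts hrl
    apply List.ext_getElem
    · rw [runA_length, hlen]; simp
    · intro m hmA hmB
      have hm' : m ≤ rl.toNat := by
        have h2 := hmA
        rw [runA_length, hlen] at h2
        omega
      rw [← List.getD_eq_getElem _ 0 hmA,
        runA_getD_low cuts _ hc1 rl.toNat (by omega) m hm']
      simp only [List.getElem_map, List.getElem_range]
      rfl
  · have hnil : cuts = [] := by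
      cases cuts with
      | nil => rfl
      | cons c t => exact absurd (hPre c List.mem_cons_self) (by omega)
    subst hnil
    unfold max_ribbon_cut max_ribbon_cut_alt
    rw [show (rl + 1).toNat = 0 by omega]
    rw [PySem.List.pyRange_one_eq_nil (by omega), PySem.List.pyRange_one_eq_nil (by omega)]
    rfl

-- ===== VERDICT (by name: the statement is the Claim_ definition above) =====
theorem max_ribbon_cut_spec : Claim_equal_max_ribbon_cut := by
  intro rl cuts _ hPre
  unfold Spec_max_ribbon_cut
  exact pv_main rl cuts hPre
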